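-- pv_equiv track=rewrite | github.com/nathan29849/TIL | 03_Python/Study/기타/백준_Java_vs_C++.py | solution
-- ===== SOURCE A (Python) =====
-- def solution(string):
--     n = len(string)
--     result = ""
--
--     if string[0].isupper():     # 첫 글자가 대문자라면 모든 경우에 해당이 안됨
--         return "Error!"
--
--     if "_" in string:   # C++의 가능성이 있는 경우
--         new = list(string.split("_"))
--         for i in range(len(new)):
--             if i != 0:
--                 if len(new[i]) == 0:    # _가 두 번 이상 나온경우
--                     return "Error!"
--                 for j in range(len(new[i])):
--                     if new[i][j].islower():
--                         if j == 0:
--                             result += new[i][j].upper()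
--                         else:
--                             result += new[i][j]
--                     else:    # _로 분리된 단어들 중 글자가 소문자가 아닌경우
--                         return "Error!"
--             else:
--                 for x in new[i]:
--                     if x.isupper(): # nM_n (첫 문자덩어리에 대문자가 포함된 경우)
--                         return "Error!"
--                 result += new[i]
--     else:               # Java의 가능성이 있는 경우
--         for i in range(n):
--             if string[i].isalpha():
--                 if string[i].isupper(): # 대문자라면 분리해주어야 함
--                     result += "_"+(string[i].lower())
--                 else:
--                     result += string[i]
--             else:
--                 return  "Error!"
--
--     if result[0].isupper():
--         return "Error!"
--     elif result[0].isalpha():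
--         return result
--     else:
--         return "Error!"
-- ===== SOURCE B (Python) =====
-- def solution(string):
--     first = string[0]           # same IndexError as A on ""
--     if first.isupper():
--         return "Error!"
--     if "_" in string:
--         # single scan, no split: flags instead of a segment list
--         chars = []
--         in_first = True         # still inside the first '_'-segment
--         at_start = False        # the next char begins a later segment
--         for ch in string:
--             if ch == '_':
--                 if not in_first and at_start:
--                     return "Error!"     # empty later segment ("__")
--                 in_first = False
--                 at_start = True
--             elif in_first:
--                 if ch.isupper():
--                     return "Error!"
--                 chars.append(ch)
--             elif not ch.islower():
--                 return "Error!"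
--             else:
--                 chars.append(ch.upper() if at_start else ch)
--                 at_start = False
--         if at_start:
--             return "Error!"             # trailing underscore
--         head = chars[0]
--         if head.isalpha() and not head.isupper():
--             return "".join(chars)
--         return "Error!"
--     # no underscore: Java -> C++
--     out = []
--     for ch in string:
--         if not ch.isalpha():
--             return "Error!"
--         out.append('_' + ch.lower() if ch.isupper() else ch)
--     return "".join(out)
-- ===== Notes on version B (the rewrite author's own statement) =====
-- stated objective: faster
-- what changed: B replaces A's underscore-split plus nested index-tracking loops by a single character scan carrying two flags (inside-first-segment, at-segment-start), detecting empty and trailing segments on the fly, merging A's three-way final head recheck into one combined test and dropping it in the Java branch where it is provably redundant.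
import Mathlib
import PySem

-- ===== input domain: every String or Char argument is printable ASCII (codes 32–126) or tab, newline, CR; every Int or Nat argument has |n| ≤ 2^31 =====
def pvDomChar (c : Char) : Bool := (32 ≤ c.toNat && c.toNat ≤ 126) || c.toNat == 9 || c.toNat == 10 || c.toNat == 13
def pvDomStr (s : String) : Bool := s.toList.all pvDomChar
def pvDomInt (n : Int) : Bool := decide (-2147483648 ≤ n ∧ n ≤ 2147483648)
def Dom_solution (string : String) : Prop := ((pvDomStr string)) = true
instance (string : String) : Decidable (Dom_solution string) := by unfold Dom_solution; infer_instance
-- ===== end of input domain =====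

-- B replaces A's underscore-split plus nested indexed loops by one flag-carrying scan (faster by a constant factor: no intermediate segment list); same return values everywhere A returns.

-- ===== PORT A =====
-- for x in new[0]: if x.isupper(): return "Error!"
def aFirstSegHasUpper : List Char → Bool
  | [] => false
  | x :: rest => if PySem.Chars.isupper x then true else aFirstSegHasUpper rest

-- inner loop over a later segment new[i] (i ≠ 0), j the char index
def aLaterLoop : List Char → Nat → List Char → Option (List Char)
  | [], _, acc => some acc
  | c :: rest, j, acc =>
    if PySem.Chars.islower c then
      aLaterLoop rest (j + 1) (acc ++ [if j == 0 then PySem.Chars.upperChar c else c])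
    else none

-- loop over the segments of string.split('_'), i the segment index; none = "Error!"
def aSegLoop : List (List Char) → Nat → List Char → Option (List Char)
  | [], _, acc => some acc
  | seg :: rest, i, acc =>
    if i ≠ 0 then
      if seg.length = 0 then none
      else
        match aLaterLoop seg 0 acc with
        | none => none
        | some acc' => aSegLoop rest (i + 1) acc'
    else
      if aFirstSegHasUpper seg then none
      else aSegLoop rest (i + 1) (acc ++ seg)

-- the Java branch: for i in range(n)
def aJavaLoop : List Char → List Char → Option (List Char)
  | [], acc => some acc
  | c :: rest, acc =>
    if PySem.Chars.isalpha c then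
      if PySem.Chars.isupper c then aJavaLoop rest (acc ++ ['_', PySem.Chars.lowerChar c])
      else aJavaLoop rest (acc ++ [c])
    else none

-- the final result[0] three-way check
def aFinalCheck : List Char → String
  | [] => ""            -- Python would raise IndexError on result[0]; unreachable from solution
  | r0 :: rest =>
    if PySem.Chars.isupper r0 then "Error!"
    else if PySem.Chars.isalpha r0 then String.ofList (r0 :: rest)
    else "Error!"

def solution (string : String) : String :=
  let cs := string.toList
  match PySem.Str.pyGet? string 0 with
  | none => ""          -- Python raises IndexError on "" (excluded by Pre_solution)
  | some c0 =>
    if PySem.Chars.isupper c0 then "Error!"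
    else if PySem.Chars.isIn ['_'] cs then
      match aSegLoop (PySem.Chars.splitOn cs ['_']) 0 [] with
      | none => "Error!"
      | some res => aFinalCheck res
    else
      match aJavaLoop cs [] with
      | none => "Error!"
      | some res => aFinalCheck res

-- ===== PORT B =====
-- one scan with two flags; none = "Error!", otherwise (chars, at_start) at loop end
def bUnderLoop : List Char → Bool → Bool → List Char → Option (List Char × Bool)
  | [], _, atStart, acc => some (acc, atStart)
  | c :: rest, inFirst, atStart, acc =>
    if c = '_' then
      if !inFirst && atStart then none
      else bUnderLoop rest false true acc
    else if inFirst then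
      if PySem.Chars.isupper c then none
      else bUnderLoop rest inFirst atStart (acc ++ [c])
    else if !(PySem.Chars.islower c) then none
    else bUnderLoop rest inFirst false (acc ++ [if atStart then PySem.Chars.upperChar c else c])

-- head.isalpha() and not head.isupper()
def bHeadOk : List Char → String
  | [] => ""            -- Python would raise IndexError on chars[0]; unreachable from solution_alt
  | h :: t => if PySem.Chars.isalpha h && !PySem.Chars.isupper h then String.ofList (h :: t) else "Error!"

def bJavaLoop : List Char → List Char → Option (List Char)
  | [], acc => some acc
  | c :: rest, acc =>
    if !(PySem.Chars.isalpha c) then none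
    else bJavaLoop rest (acc ++ (if PySem.Chars.isupper c then ['_', PySem.Chars.lowerChar c] else [c]))

def solution_alt (string : String) : String :=
  let cs := string.toList
  match PySem.Str.pyGet? string 0 with
  | none => ""          -- Python raises IndexError on ""
  | some c0 =>
    if PySem.Chars.isupper c0 then "Error!"
    else if PySem.Chars.isIn ['_'] cs then
      match bUnderLoop cs true false [] with
      | none => "Error!"
      | some (_, true) => "Error!"
      | some (acc, false) => bHeadOk acc
    else
      match bJavaLoop cs [] with
      | none => "Error!"
      | some res => String.ofList res

-- ===== PRECONDITION & SPEC =====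
-- Pre_ excludes only the empty string, on which A (string[0]) and B raise IndexError.
def Pre_solution (string : String) : Prop := string ≠ ""
instance (string : String) : Decidable (Pre_solution string) := by unfold Pre_solution; infer_instance
def pvWitness_solution : String := "a_b"

def Spec_solution (string : String) (out : String) : Prop := out = solution_alt string
instance (string : String) (out : String) : Decidable (Spec_solution string out) := by unfold Spec_solution; infer_instance

-- ===== CLAIM (what is proved, stated in full; the proofs are below) =====
def Claim_equal_solution : Prop := ∀ (string : String), Dom_solution string → Pre_solution string → Spec_solution string (solution string)

-- ===== LEMMAS AND PROOFS =====

-- structural single-char split (proved equal to PySem.Chars.splitOn cs ['_'])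
def sp : List Char → List (List Char)
  | [] => [[]]
  | c :: rest =>
    if c = '_' then [] :: sp rest
    else
      match sp rest with
      | [] => [[c]]
      | s :: ss => (c :: s) :: ss

-- index-free forms of A's loops
def aLaterRest : List Char → List Char → Option (List Char)
  | [], acc => some acc
  | c :: rest, acc => if PySem.Chars.islower c then aLaterRest rest (acc ++ [c]) else none

def aTail : List (List Char) → List Char → Option (List Char)
  | [], acc => some acc
  | seg :: ss, acc =>
    if seg.length = 0 then none
    else
      match aLaterLoop seg 0 acc with
      | none => none
      | some acc' => aTail ss acc'

def aTailMid : List (List Char) → List Char → Option (List Char)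
  | [], acc => some acc
  | seg :: ss, acc =>
    match aLaterRest seg acc with
    | none => none
    | some acc' => aTail ss acc'

def aProc : List (List Char) → List Char → Option (List Char)
  | [], acc => some acc
  | seg :: ss, acc => if aFirstSegHasUpper seg then none else aTail ss (acc ++ seg)

def bFinal : Option (List Char × Bool) → Option (List Char)
  | none => none
  | some (_, true) => none
  | some (acc, false) => some acc

theorem sp_ne_nil (cs : List Char) : sp cs ≠ [] := by
  match cs with
  | [] => simp [sp]
  | c :: rest =>
    simp only [sp]
    split
    · simp
    · cases h : sp rest <;> simp

theorem sp_cons_ne (c : Char) (rest : List Char) (hc : c ≠ '_') :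
    ∃ s ss, sp rest = s :: ss ∧ sp (c :: rest) = (c :: s) :: ss := by
  cases h : sp rest with
  | nil => exact absurd h (sp_ne_nil rest)
  | cons s ss => exact ⟨s, ss, rfl, by simp [sp, hc, h]⟩

theorem splitOn_go_spec (fuel : Nat) : ∀ (l cur : List Char) (accs : List (List Char)),
    l.length < fuel →
    PySem.Chars.splitOn.go ['_'] fuel l cur accs =
      accs.reverse ++ (cur.reverse ++ (sp l).headI) :: (sp l).tail := by
  induction fuel with
  | zero => intro l cur accs h; omega
  | succ fuel ih =>
    intro l cur accs h
    cases l with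
    | nil => simp [PySem.Chars.splitOn.go, sp]
    | cons c rest =>
      rw [PySem.Chars.splitOn.go]
      by_cases hc : c = '_'
      · subst hc
        have hpre : List.isPrefixOf ['_'] ('_' :: rest) = true := by
          simp [List.isPrefixOf]
        rw [if_pos hpre]
        have hlen : rest.length < fuel := by simp at h; omega
        have hdrop : List.drop (List.length ['_']) ('_' :: rest) = rest := by simp
        rw [hdrop, ih rest [] (cur.reverse :: accs) hlen]
        cases hrest : sp rest with
        | nil => exact absurd hrest (sp_ne_nil rest)
        | cons s ss => simp [sp, hrest]
      · have hpre : List.isPrefixOf ['_'] (c :: rest) = false := by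
          cases hp : List.isPrefixOf ['_'] (c :: rest) with
          | false => rfl
          | true =>
            exfalso
            have := List.isPrefixOf_iff_prefix.mp hp
            simp at this
            exact hc this.symm
        rw [if_neg (by simp [hpre])]
        have hlen : rest.length < fuel := by simp at h; omega
        rw [ih rest (c :: cur) accs hlen]
        obtain ⟨s, ss, hrest, hsp⟩ := sp_cons_ne c rest hc
        simp [hrest, hsp]

theorem splitOn_underscore (cs : List Char) : PySem.Chars.splitOn cs ['_'] = sp cs := by
  unfold PySem.Chars.splitOn
  rw [splitOn_go_spec (cs.length + 1) cs [] [] (by omega)]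
  cases h : sp cs with
  | nil => exact absurd h (sp_ne_nil cs)
  | cons s ss => simp

theorem aLaterLoop_pos (seg : List Char) (j : Nat) (acc : List Char) (hj : j ≠ 0) :
    aLaterLoop seg j acc = aLaterRest seg acc := by
  induction seg generalizing j acc with
  | nil => rfl
  | cons c rest ih =>
    have hj0 : (j == 0) = false := by simp [hj]
    simp only [aLaterLoop, aLaterRest, hj0]
    by_cases hl : PySem.Chars.islower c <;> simp [hl, ih (j + 1) _ (by omega)]

theorem aSegLoop_pos (segs : List (List Char)) (i : Nat) (acc : List Char) (hi : i ≠ 0) :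
    aSegLoop segs i acc = aTail segs acc := by
  induction segs generalizing i acc with
  | nil => rfl
  | cons seg ss ih =>
    simp only [aSegLoop, aTail, if_pos hi]
    split
    · rfl
    · cases h : aLaterLoop seg 0 acc with
      | none => rfl
      | some acc' => exact ih (i + 1) acc' (by omega)

theorem aSegLoop_zero (segs : List (List Char)) (acc : List Char) :
    aSegLoop segs 0 acc = aProc segs acc := by
  cases segs with
  | nil => rfl
  | cons seg ss =>
    simp only [aSegLoop, aProc, ne_eq, not_true_eq_false, if_false]
    split
    · rfl
    · exact aSegLoop_pos ss 1 (acc ++ seg) (by omega)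

theorem bUnder_later (cs : List Char) (flag : Bool) (acc : List Char) :
    bFinal (bUnderLoop cs false flag acc) =
      (if flag then aTail (sp cs) acc else aTailMid (sp cs) acc) := by
  induction cs generalizing flag acc with
  | nil =>
    cases flag <;> simp [bUnderLoop, bFinal, sp, aTail, aTailMid, aLaterRest]
  | cons c rest ih =>
    by_cases hc : c = '_'
    · subst hc
      cases flag with
      | true => simp [bUnderLoop, bFinal, sp, aTail]
      | false => simpa [bUnderLoop, sp, aTailMid, aLaterRest] using ih true acc
    · obtain ⟨s, ss, hrest, hsp⟩ := sp_cons_ne c rest hc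
      by_cases hl : PySem.Chars.islower c
      · cases flag with
        | true =>
          have key := ih false (acc ++ [PySem.Chars.upperChar c])
          simp only [Bool.false_eq_true, if_false, hrest] at key
          have lhs : bUnderLoop (c :: rest) false true acc =
              bUnderLoop rest false false (acc ++ [PySem.Chars.upperChar c]) := by
            simp [bUnderLoop, hc, hl]
          have rhs : aTail (sp (c :: rest)) acc =
              aTailMid (s :: ss) (acc ++ [PySem.Chars.upperChar c]) := by
            rw [hsp]
            simp [aTail, aLaterLoop, hl, aTailMid, aLaterLoop_pos s 1 _ (by omega)]
          rw [if_pos rfl, lhs, rhs, key]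
        | false =>
          have key := ih false (acc ++ [c])
          simp only [Bool.false_eq_true, if_false, hrest] at key
          have lhs : bUnderLoop (c :: rest) false false acc =
              bUnderLoop rest false false (acc ++ [c]) := by
            simp [bUnderLoop, hc, hl]
          have rhs : aTailMid (sp (c :: rest)) acc = aTailMid (s :: ss) (acc ++ [c]) := by
            rw [hsp]
            simp [aTailMid, aLaterRest, hl]
          rw [if_neg (by simp), lhs, rhs, key]
      · have hff : bUnderLoop (c :: rest) false flag acc = none := by
          simp [bUnderLoop, hc, hl]
        cases flag with
        | true => simp [hff, bFinal, hsp, aTail, aLaterLoop, hl]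
        | false => simp [hff, bFinal, hsp, aTailMid, aLaterRest, hl]

theorem bUnder_first (cs : List Char) (acc : List Char) :
    bFinal (bUnderLoop cs true false acc) = aProc (sp cs) acc := by
  induction cs generalizing acc with
  | nil => simp [bUnderLoop, bFinal, sp, aProc, aFirstSegHasUpper, aTail]
  | cons c rest ih =>
    by_cases hc : c = '_'
    · subst hc
      have := bUnder_later rest true acc
      simp only [if_pos] at this
      simp [bUnderLoop, sp, aProc, aFirstSegHasUpper, this]
    · simp only [bUnderLoop, if_neg hc]
      have hsp := sp_ne_nil rest
      cases hrest : sp rest with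
      | nil => exact absurd hrest hsp
      | cons s ss =>
        by_cases hu : PySem.Chars.isupper c
        · simp [hu, bFinal, sp, hc, hrest, aProc, aFirstSegHasUpper]
        · have := ih (acc ++ [c])
          rw [hrest] at this
          simp [hu, this, sp, hc, hrest, aProc, aFirstSegHasUpper]

theorem aJava_eq_bJava (cs acc : List Char) : aJavaLoop cs acc = bJavaLoop cs acc := by
  induction cs generalizing acc with
  | nil => rfl
  | cons c rest ih =>
    simp only [aJavaLoop, bJavaLoop]
    by_cases ha : PySem.Chars.isalpha c
    · by_cases hu : PySem.Chars.isupper c <;> simp [ha, hu, ih]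
    · simp [ha]

theorem bJava_prefix (cs : List Char) : ∀ acc res, bJavaLoop cs acc = some res → acc <+: res := by
  induction cs with
  | nil => intro acc res h; simp [bJavaLoop] at h; simp [h]
  | cons c rest ih =>
    intro acc res h
    simp only [bJavaLoop] at h
    split at h
    · exact absurd h (by simp)
    · exact List.IsPrefix.trans (List.prefix_append _ _) (ih _ _ h)

theorem aFinal_eq_bHead (res : List Char) : aFinalCheck res = bHeadOk res := by
  cases res with
  | nil => rfl
  | cons r0 t =>
    simp only [aFinalCheck, bHeadOk]
    by_cases hu : PySem.Chars.isupper r0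
    · have ha : PySem.Chars.isalpha r0 = true := by simp [PySem.Chars.isalpha, hu]
      simp [hu, ha]
    · by_cases ha : PySem.Chars.isalpha r0 <;> simp [hu, ha]

-- ===== VERDICT (by name: the statement is the Claim_ definition above) =====
theorem solution_spec : Claim_equal_solution := by
  unfold Claim_equal_solution
  intro string _ _
  unfold Spec_solution solution solution_alt
  cases h0 : PySem.Str.pyGet? string 0 with
  | none =>
    -- Pre_ rules this case out: string ≠ "" makes string[0] defined
    exfalso
    apply ‹Pre_solution string›
    simp only [pysem] at h0
    cases hsl : string.toList with
    | nil => exact String.toList_inj.mp (by simp [hsl])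
    | cons c t => rw [hsl] at h0; simp at h0
  | some c0 =>
    by_cases hu : PySem.Chars.isupper c0
    · simp [hu]
    · simp only [hu, Bool.false_eq_true, if_false]
      by_cases hin : PySem.Chars.isIn ['_'] string.toList = true
      · rw [if_pos hin, if_pos hin, splitOn_underscore, aSegLoop_zero]
        have hb := bUnder_first string.toList []
        cases hbu : bUnderLoop string.toList true false [] with
        | none =>
          rw [hbu] at hb
          simp only [bFinal] at hb
          rw [← hb]
        | some p =>
          obtain ⟨acc, st⟩ := p
          cases st with
          | true =>
            rw [hbu] at hb
            simp only [bFinal] at hb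
            rw [← hb]
          | false =>
            rw [hbu] at hb
            simp only [bFinal] at hb
            rw [← hb]
            simpa using aFinal_eq_bHead acc
      · rw [if_neg hin, if_neg hin, aJava_eq_bJava]
        cases hj : bJavaLoop string.toList [] with
        | none => rfl
        | some res =>
          have hcs : ∃ t, string.toList = c0 :: t := by
            simp only [pysem] at h0
            cases hsl : string.toList with
            | nil => rw [hsl] at h0; simp at h0
            | cons c t => rw [hsl] at h0; simp at h0; exact ⟨t, by rw [h0]⟩
          obtain ⟨t, ht⟩ := hcs
          rw [ht] at hj
          by_cases ha : PySem.Chars.isalpha c0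
          · rw [bJavaLoop, if_neg (by simp [ha]), if_neg (by simp [hu])] at hj
            have hpre := bJava_prefix t ([] ++ [c0]) res hj
            simp only [List.nil_append] at hpre
            obtain ⟨t', ht'⟩ := hpre
            rw [← ht']
            simp [aFinalCheck, hu, ha]
          · rw [bJavaLoop, if_pos (by simp [ha])] at hj
            exact absurd hj (by simp)
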